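-- pv_equiv track=rewrite | github.com/ydb-platform/ydb | contrib/python/django-treebeard/treebeard/ltree/__init__.py | generate_label
-- ===== SOURCE A (Python) =====
-- import itertools
-- import string
--
-- class InvalidLabelConstraints(Exception): ...
--
-- def generate_label(
--     skip: set[str],
--     before: str | None = None,
--     after: str | None = None,
-- ):
--     """
--     Generate a new label value that will order the label before `before` and after `after`.
--
--     Uses an alphabet of digits and ascii uppercase letters.
--     If no `before` constraint is provided, then chooses only from letters: this allows room
--     for digits to be used in future if nodes are inserted to the left of this one, without
--     having to move large chunks of the tree.
--
--     :raise InvalidLabelConstraints: when no label could be generated within the given constraints.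
--     """
--     char_choices = string.ascii_uppercase if not before and not after else string.digits + string.ascii_uppercase
--
--     start = after or char_choices[0]
--
--     if before and before <= start:
--         raise InvalidLabelConstraints
--
--     # Construct sets of characters for each position, appending one at the end if we need to extend the string
--     char_lists = [char_choices[idx:] for idx in [char_choices.index(char) for char in start]]
--     char_lists.append(char_choices)
--
--     # There is no point testing portions of the strings that are identical
--     start_from = 0
--     for ch1, ch2 in zip(before or "", after or ""):
--         if ch1 != ch2:
--             break
--         start_from += 1
--
--     for i in range(start_from, len(char_lists)):
--         iter = itertools.product(*char_lists[: i + 1])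
--         for label_parts in iter:
--             label = "".join(label_parts)
--             if after and label <= after:
--                 continue
--             if label in skip:
--                 continue
--             if before and label >= before:
--                 break  # No point looking any further
--             return label
--
--     # We should never reach here... right?
--     raise ValueError("Failed to generate label. Please report this as a bug.")
-- ===== SOURCE B (Python) =====
-- import string
--
-- class InvalidLabelConstraints(Exception): ...
--
-- def generate_label(
--     skip: set,
--     before: str | None = None,
--     after: str | None = None,
-- ):
--     """Recursive depth-first search over the candidate label space, shortest labels first."""
--     before = before or ""
--     after = after or ""
--     char_choices = string.ascii_uppercase if not before and not after else string.digits + string.ascii_uppercase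
--     start = after if after else char_choices[0]
--     if before and not start < before:
--         raise InvalidLabelConstraints
--     # per-position allowed characters (ascending); one extra full position to extend the length
--     bounds = [[c for c in char_choices if c >= ch] for ch in start] + [list(char_choices)]
--     start_from = _common_prefix_len(before, after)
--     FOUND, STOP, MISS = 0, 1, 2
--
--     def dfs(prefix, rest):
--         if not rest:
--             if after and not after < prefix:
--                 return MISS, None
--             if prefix in skip:
--                 return MISS, None
--             if before and not prefix < before:
--                 return STOP, None
--             return FOUND, prefix
--         for c in rest[0]:
--             tag, val = dfs(prefix + c, rest[1:])
--             if tag != MISS: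
--                 return tag, val
--         return MISS, None
--
--     for i in range(start_from, len(bounds)):
--         tag, val = dfs("", bounds[: i + 1])
--         if tag == FOUND:
--             return val
--     raise ValueError("Failed to generate label. Please report this as a bug.")
--
-- def _common_prefix_len(x: str, y: str) -> int:
--     i = 0
--     while i < len(x) and i < len(y) and x[i] == y[i]:
--         i += 1
--     return i
-- ===== Notes on version B (the rewrite author's own statement) =====
-- stated objective: alternative
-- what changed: Replaces itertools.product materialization plus a guard/break scan with a recursive depth-first search that appends one character at a time and propagates a three-valued found/stop/miss outcome, computing per-position character sets by order-filtering the alphabet instead of index/slice.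
import Mathlib
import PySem

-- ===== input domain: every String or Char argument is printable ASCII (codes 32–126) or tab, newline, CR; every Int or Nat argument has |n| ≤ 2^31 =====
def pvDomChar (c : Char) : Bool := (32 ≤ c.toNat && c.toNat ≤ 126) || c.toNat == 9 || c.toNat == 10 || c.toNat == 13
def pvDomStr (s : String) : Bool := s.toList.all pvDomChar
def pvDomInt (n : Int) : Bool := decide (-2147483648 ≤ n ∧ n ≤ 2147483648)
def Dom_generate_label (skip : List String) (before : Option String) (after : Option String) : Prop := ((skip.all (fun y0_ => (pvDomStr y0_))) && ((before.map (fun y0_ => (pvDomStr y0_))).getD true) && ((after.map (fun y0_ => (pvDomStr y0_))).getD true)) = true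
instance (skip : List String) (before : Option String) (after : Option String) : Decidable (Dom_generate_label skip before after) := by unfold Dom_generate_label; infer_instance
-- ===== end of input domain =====

-- B replaces the itertools.product enumeration + guard/break scan by a recursive depth-first
-- search with a three-valued found/stop/miss outcome and order-filtered per-position alphabets
-- (alternative decomposition, same asymptotic cost). The equivalence is about the return value;
-- where Python A raises, the ports return "" and those inputs are excluded by Pre_.

def ucChars : List Char :=
  ['A','B','C','D','E','F','G','H','I','J','K','L','M','N','O','P','Q','R','S','T','U','V','W','X','Y','Z']

def duChars : List Char :=
  ['0','1','2','3','4','5','6','7','8','9'] ++ ucChars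

-- ===== PORT A =====

-- itertools.product(*lists), leftmost position varying slowest
def pyProductA : List (List Char) → List (List Char)
  | [] => [[]]
  | l :: rest => l.flatMap (fun c => (pyProductA rest).map (fun t => c :: t))

-- the inner 'for label_parts in iter' loop: continue / continue / break / return label
def scanA (skipL : List (List Char)) (b a : List Char) : List (List Char) → Option (List Char)
  | [] => none
  | lp :: rest =>
      if a ≠ [] ∧ ¬ (a < lp) then scanA skipL b a rest          -- after and label <= after: continue
      else if lp ∈ skipL then scanA skipL b a rest               -- label in skip: continue
      else if b ≠ [] ∧ ¬ (lp < b) then none                      -- before and label >= before: break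
      else some lp                                               -- return label

-- 'for ch1, ch2 in zip(before or "", after or ""): if ch1 != ch2: break; start_from += 1'
def sfA : List (Char × Char) → Nat
  | [] => 0
  | (c1, c2) :: t => if c1 ≠ c2 then 0 else sfA t + 1

def generate_label (skip : List String) (before : Option String) (after : Option String) : String :=
  let b := (before.getD "").toList
  let a := (after.getD "").toList
  let char_choices := if b = [] ∧ a = [] then ucChars else duChars
  let start := if a ≠ [] then a else [char_choices.getD 0 ' ']
  if b ≠ [] ∧ ¬ (start < b) then ""                              -- raise InvalidLabelConstraints
  else
    let char_lists := (start.map (fun ch => char_choices.drop (char_choices.idxOf ch))) ++ [char_choices]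
    let start_from := sfA (b.zip a)
    let skipL := skip.map String.toList
    let res := (PySem.List.pyRange (start_from : Int) (char_lists.length : Int) 1).foldl
        (fun acc j => match acc with
          | some r => some r                                     -- 'return label' already hit
          | none => scanA skipL b a (pyProductA (char_lists.take (j.toNat + 1)))) none
    match res with
    | some lp => String.ofList lp
    | none => ""                                                 -- raise ValueError

-- ===== PORT B =====

inductive BRes where
  | found : List Char → BRes
  | stop : BRes
  | miss : BRes
deriving DecidableEq, Repr

mutual
-- depth-first search appending one character at a time
def dfsB (skipL : List (List Char)) (b a : List Char) : List Char → List (List Char) → BRes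
  | pfx, [] =>
      if a ≠ [] ∧ ¬ (a < pfx) then .miss
      else if pfx ∈ skipL then .miss
      else if b ≠ [] ∧ ¬ (pfx < b) then .stop
      else .found pfx
  | pfx, l :: rest => rowB skipL b a pfx l rest
  termination_by _pfx ls => (ls.length, 0)
-- 'for c in rest[0]' with found/stop short-circuit
def rowB (skipL : List (List Char)) (b a : List Char) : List Char → List Char → List (List Char) → BRes
  | _, [], _ => .miss
  | pfx, c :: cs, rest =>
      match dfsB skipL b a (pfx ++ [c]) rest with
      | .miss => rowB skipL b a pfx cs rest
      | r => r
  termination_by _pfx cs rest => (rest.length, cs.length + 1)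
end

def cplB : List Char → List Char → Nat
  | c :: x, d :: y => if c = d then cplB x y + 1 else 0
  | _, _ => 0

-- 'for i in range(start_from, len(bounds))' as recursion on the number of lengths left
def tryB (skipL : List (List Char)) (b a : List Char) (bounds : List (List Char)) : Nat → Nat → Option (List Char)
  | _, 0 => none
  | i, n + 1 =>
      match dfsB skipL b a [] (bounds.take (i + 1)) with
      | .found lp => some lp
      | _ => tryB skipL b a bounds (i + 1) n

def generate_label_alt (skip : List String) (before : Option String) (after : Option String) : String :=
  let b := (before.getD "").toList
  let a := (after.getD "").toList
  let char_choices := if b = [] ∧ a = [] then ucChars else duChars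
  let start := if a ≠ [] then a else [char_choices.getD 0 ' ']
  if b ≠ [] ∧ ¬ (start < b) then ""                              -- raise InvalidLabelConstraints
  else
    let bounds := (start.map (fun ch => char_choices.filter (fun d => ch ≤ d))) ++ [char_choices]
    let sf := cplB b a
    match tryB (skip.map String.toList) b a bounds sf (bounds.length - sf) with
    | some lp => String.ofList lp
    | none => ""                                                 -- raise ValueError

-- ===== PRECONDITION & SPEC =====

-- the candidate-label space: all strings taking one character from each position's alphabet.
-- It only DESCRIBES the search space for Pre_'s existential below; it encodes no guard,
-- no enumeration order and no break logic of either port.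
def pvProd : List (List Char) → List (List Char)
  | [] => [[]]
  | l :: rest => l.flatMap (fun c => (pvProd rest).map (fun t => c :: t))

-- Pre_ = exactly the inputs on which Python A returns: every character of `start` occurs in the
-- alphabet (else str.index raises ValueError), the before bound is satisfiable (else
-- InvalidLabelConstraints), and some candidate label of length ≤ len(start)+1 is > after,
-- < before and not in skip (else the final ValueError — no label can exist between the bounds,
-- e.g. before = after + "0").
def Pre_generate_label (skip : List String) (before : Option String) (after : Option String) : Prop :=
  let b := (before.getD "").toList
  let a := (after.getD "").toList
  let char_choices := if b = [] ∧ a = [] then ucChars else duChars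
  let start := if a ≠ [] then a else [char_choices.getD 0 ' ']
  (start.all (fun ch => char_choices.contains ch) = true) ∧
  (b ≠ [] → start < b) ∧
  (List.range (start.length + 2)).any (fun n => decide (1 ≤ n) &&
    (pvProd ((start.map (fun ch => char_choices.filter (fun d => ch ≤ d)) ++ [char_choices]).take n)).any
      (fun lp => (a.isEmpty || decide (a < lp)) &&
                 !((skip.map String.toList).contains lp) &&
                 (b.isEmpty || decide (lp < b)))) = true

instance (skip : List String) (before : Option String) (after : Option String) : Decidable (Pre_generate_label skip before after) := by
  unfold Pre_generate_label; infer_instance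

def pvWitness_generate_label : List String × Option String × Option String := (["A"], none, some "B")

def Spec_generate_label (skip : List String) (before : Option String) (after : Option String) (out : String) : Prop := out = generate_label_alt skip before after
instance (skip : List String) (before : Option String) (after : Option String) (out : String) : Decidable (Spec_generate_label skip before after out) := by unfold Spec_generate_label; infer_instance

-- ===== CLAIM (what is proved, stated in full; the proofs are below) =====
def Claim_equal_generate_label : Prop := ∀ (skip : List String) (before : Option String) (after : Option String), Dom_generate_label skip before after → Pre_generate_label skip before after → Spec_generate_label skip before after (generate_label skip before after)

-- ===== LEMMAS AND PROOFS =====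

theorem uc_sorted : ucChars.Pairwise (· < ·) :=
  List.isChain_iff_pairwise.mp (by decide)

theorem du_sorted : duChars.Pairwise (· < ·) :=
  List.isChain_iff_pairwise.mp (by decide)

-- for a strictly sorted alphabet, A's slice-at-index is B's order filter
theorem drop_idxOf_eq_filter (c : Char) :
    ∀ (l : List Char), l.Pairwise (· < ·) → c ∈ l →
      l.drop (l.idxOf c) = l.filter (fun d => c ≤ d) := by
  intro l
  induction l with
  | nil => intro _ h; cases h
  | cons h t ih =>
      intro hp hc
      rcases List.pairwise_cons.mp hp with ⟨hlt, hp'⟩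
      by_cases hch : c = h
      · subst hch
        rw [List.idxOf_cons_self, List.drop_zero]
        rw [List.filter_cons_of_pos (by simp), List.filter_eq_self.mpr]
        intro x hx; simp [le_of_lt (hlt x hx)]
      · have hct : c ∈ t := by cases hc with
          | head => exact absurd rfl hch
          | tail _ h => exact h
        have hlc : h < c := hlt c hct
        rw [List.idxOf_cons_ne _ (by exact fun hh => hch hh.symm), List.drop_succ_cons,
            List.filter_cons_of_neg (by simp [not_le.mpr hlc]), ih hp' hct]

-- A's scan made three-valued (found / stop(break) / miss(exhausted)) so it composes over ++
def scanR (skipL : List (List Char)) (b a : List Char) : List (List Char) → BRes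
  | [] => .miss
  | lp :: rest =>
      if a ≠ [] ∧ ¬ (a < lp) then scanR skipL b a rest
      else if lp ∈ skipL then scanR skipL b a rest
      else if b ≠ [] ∧ ¬ (lp < b) then .stop
      else .found lp

theorem scanA_eq_scanR (skipL : List (List Char)) (b a : List Char) (L : List (List Char)) :
    scanA skipL b a L = (match scanR skipL b a L with | .found lp => some lp | _ => none) := by
  induction L with
  | nil => rfl
  | cons lp rest ih =>
      simp only [scanA, scanR]
      split_ifs <;> simp [ih]

theorem scanR_append (skipL : List (List Char)) (b a : List Char) (L1 L2 : List (List Char)) :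
    scanR skipL b a (L1 ++ L2) =
      (match scanR skipL b a L1 with | .miss => scanR skipL b a L2 | r => r) := by
  induction L1 with
  | nil => rfl
  | cons lp rest ih =>
      simp only [List.cons_append, scanR]
      split_ifs <;> simp [ih]

-- the depth-first search visits exactly the product labels, in product order
theorem dfsB_eq_scanR (skipL : List (List Char)) (b a : List Char) :
    ∀ (ls : List (List Char)) (pfx : List Char),
      dfsB skipL b a pfx ls = scanR skipL b a ((pyProductA ls).map (fun t => pfx ++ t)) := by
  intro ls
  induction ls with
  | nil =>
      intro pfx
      simp only [pyProductA, List.map_cons, List.map_nil, List.append_nil, dfsB, scanR]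
  | cons l rest ih =>
      intro pfx
      have row : ∀ cs : List Char,
          rowB skipL b a pfx cs rest =
            scanR skipL b a ((cs.flatMap (fun c => (pyProductA rest).map (fun t => c :: t))).map
              (fun t => pfx ++ t)) := by
        intro cs
        induction cs with
        | nil => simp [rowB, scanR]
        | cons c cs ihc =>
            rw [List.flatMap_cons, List.map_append, scanR_append]
            have h1 : ((pyProductA rest).map (fun t => c :: t)).map (fun t => pfx ++ t)
                = (pyProductA rest).map (fun t => (pfx ++ [c]) ++ t) := by
              rw [List.map_map]; apply List.map_congr_left
              intro t _; simp
            rw [h1, ← ih (pfx ++ [c]), ← ihc, rowB]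
      rw [dfsB, row]; rfl

-- once the label is found the remaining fold iterations keep it
theorem foldl_keep_some (g : Int → Option (List Char)) (r : List Char) :
    ∀ L : List Int,
      L.foldl (fun acc j => match acc with | some r' => some r' | none => g j) (some r) = some r := by
  intro L
  induction L with
  | nil => rfl
  | cons x t ih => simpa using ih

-- the range(start_from, len) fold is B's recursion on the number of lengths left
theorem outer_eq (skipL : List (List Char)) (b a : List Char) (bounds : List (List Char)) :
    ∀ (n i : Nat), i + n = bounds.length →
      (PySem.List.pyRange (i : Int) (bounds.length : Int) 1).foldl
        (fun acc j => match acc with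
          | some r => some r
          | none => scanA skipL b a (pyProductA (bounds.take (j.toNat + 1)))) none
      = tryB skipL b a bounds i n := by
  intro n
  induction n with
  | zero =>
      intro i h
      rw [PySem.List.pyRange_one_eq_nil (by omega)]
      rfl
  | succ n ihn =>
      intro i h
      rw [PySem.List.pyRange_one_cons (by omega), List.foldl_cons]
      simp only [Int.toNat_natCast]
      rw [tryB, scanA_eq_scanR]
      rw [show pyProductA (bounds.take (i + 1))
            = (pyProductA (bounds.take (i + 1))).map (fun t => ([] : List Char) ++ t) by simp]
      rw [← dfsB_eq_scanR]
      have hcast : ((i : Int) + 1) = ((i + 1 : Nat) : Int) := by push_cast; ring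
      rcases dfsB skipL b a [] (bounds.take (i + 1)) with lp | _ | _
      · exact foldl_keep_some _ lp _
      · rw [hcast]; exact ihn (i + 1) (by omega)
      · rw [hcast]; exact ihn (i + 1) (by omega)

theorem cplB_eq_sfA : ∀ (b a : List Char), cplB b a = sfA (b.zip a) := by
  intro b
  induction b with
  | nil => intro a; cases a <;> rfl
  | cons c x ih =>
      intro a
      cases a with
      | nil => rfl
      | cons d y => simp only [cplB, sfA, List.zip_cons_cons, ih]; split_ifs with h <;> simp_all

theorem cplB_le : ∀ (b a : List Char), cplB b a ≤ a.length := by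
  intro b
  induction b with
  | nil => intro a; cases a <;> simp [cplB]
  | cons c x ih =>
      intro a
      cases a with
      | nil => simp [cplB]
      | cons d y =>
          simp only [cplB, List.length_cons]
          split_ifs
          · have := ih y; omega
          · omega

-- ===== VERDICT (by name: the statement is the Claim_ definition above) =====
theorem generate_label_spec : Claim_equal_generate_label := by
  intro skip before after _ hPre
  unfold Spec_generate_label
  unfold Pre_generate_label at hPre
  unfold generate_label generate_label_alt
  simp only [] at hPre ⊢
  set b := (before.getD "").toList with hb
  set a := (after.getD "").toList with ha
  set C := if b = [] ∧ a = [] then ucChars else duChars with hC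
  set start := if a ≠ [] then a else [C.getD 0 ' '] with hstart
  obtain ⟨hmem0, hcon, -⟩ := hPre
  have hmem : ∀ ch ∈ start, ch ∈ C := by
    intro ch hch
    have := List.all_eq_true.mp hmem0 ch hch
    simpa using this
  have hCs : C.Pairwise (· < ·) := by
    rw [hC]; split
    · exact uc_sorted
    · exact du_sorted
  have hcond : ¬ (b ≠ [] ∧ ¬ (start < b)) := by
    rintro ⟨h1, h2⟩; exact h2 (hcon h1)
  rw [if_neg hcond, if_neg hcond]
  have hlists : start.map (fun ch => C.drop (C.idxOf ch)) = start.map (fun ch => C.filter (fun d => ch ≤ d)) :=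
    List.map_congr_left (fun ch h => drop_idxOf_eq_filter ch C hCs (hmem ch h))
  rw [hlists, ← cplB_eq_sfA b a]
  have hsa : cplB b a ≤ start.length := by
    by_cases hA : a = []
    · have h0 : cplB b a = 0 := by rw [hA]; cases b <;> rfl
      omega
    · have hs : start = a := by rw [hstart, if_pos hA]
      rw [hs]; exact cplB_le b a
  have hblen : ((start.map (fun ch => C.filter (fun d => ch ≤ d))) ++ [C]).length = start.length + 1 := by
    simp
  have h := outer_eq (skip.map String.toList) b a
      ((start.map (fun ch => C.filter (fun d => ch ≤ d))) ++ [C])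
      (((start.map (fun ch => C.filter (fun d => ch ≤ d))) ++ [C]).length - cplB b a)
      (cplB b a) (by omega)
  rw [h]
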